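-- pv_equiv track=rewrite | github.com/cesperon/Sonoma-State-CS | cs415/Project 1/proj1.py | intcheck
-- ===== SOURCE A (Python) =====
-- def intcheck(m, n,):
--
--     k = 0
--
--     t = min(m, n)
--
--     while t > 0:
--
--         if m % t != 0:
--             k = k + 1
--         if m % t == 0 and n % t != 0:
--             k = k + 1
--
--         if m % t == 0 and n % t == 0:
--             k = k + 2
--             return k
--
--         t = t - 1
-- ===== SOURCE B (Python) =====
-- def intcheck(m, n):
--     if min(m, n) <= 0:
--         return None
--     a, b = m, n
--     while b:
--         a, b = b, a % b
--     return min(m, n) - a + 2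
-- ===== Notes on version B (the rewrite author's own statement) =====
-- stated objective: faster
-- what changed: Replaces A's linear downward trial-division scan (decrementing t from min(m,n) until a common divisor is found, counting misses) with a hand-written Euclidean remainder loop computing gcd(m,n) plus the closed form min(m,n) - gcd(m,n) + 2.
import Mathlib
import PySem

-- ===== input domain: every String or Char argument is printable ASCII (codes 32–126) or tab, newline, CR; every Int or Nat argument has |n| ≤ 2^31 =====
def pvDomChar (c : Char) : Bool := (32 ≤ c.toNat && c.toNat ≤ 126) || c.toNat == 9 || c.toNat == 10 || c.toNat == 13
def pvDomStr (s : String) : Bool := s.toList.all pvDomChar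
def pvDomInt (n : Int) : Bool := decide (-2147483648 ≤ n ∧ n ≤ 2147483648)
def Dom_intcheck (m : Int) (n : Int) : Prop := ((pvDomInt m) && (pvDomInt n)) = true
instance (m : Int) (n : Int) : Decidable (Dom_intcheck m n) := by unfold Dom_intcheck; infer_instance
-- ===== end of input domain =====

-- B replaces A's linear downward trial-division scan by a hand-written Euclidean
-- remainder loop plus the closed form min(m,n) - gcd(m,n) + 2 (objective: faster).

-- ===== PORT A =====
-- the while-loop of A: t counts down, k accumulates; returns none when t reaches 0
def intcheckLoop (m : Int) (n : Int) (t : Int) (k : Int) : Option Int :=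
  if ht : t > 0 then
    let k1 := if PySem.Int.mod m t ≠ 0 then k + 1 else k
    let k2 := if PySem.Int.mod m t = 0 ∧ PySem.Int.mod n t ≠ 0 then k1 + 1 else k1
    if PySem.Int.mod m t = 0 ∧ PySem.Int.mod n t = 0 then some (k2 + 2)
    else intcheckLoop m n (t - 1) k2
  else none
termination_by t.toNat
decreasing_by omega

def intcheck (m : Int) (n : Int) : Option Int :=
  intcheckLoop m n (min m n) 0

-- ===== PORT B =====
-- needed by euclidB's termination: Python's % shrinks the absolute value of the divisor
theorem pymod_natAbs_lt (a b : Int) (hb : b ≠ 0) :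
    (PySem.Int.mod a b).natAbs < b.natAbs := by
  rcases lt_or_gt_of_ne hb with h | h
  · have := PySem.Int.mod_neg_bounds a h
    omega
  · have h1 := PySem.Int.mod_nonneg a h
    have h2 := PySem.Int.mod_lt a h
    omega

-- the while-loop of B: a, b = b, a % b until b == 0
def euclidB (a : Int) (b : Int) : Int :=
  if hb : b ≠ 0 then euclidB b (PySem.Int.mod a b) else a
termination_by b.natAbs
decreasing_by exact pymod_natAbs_lt a b hb

def intcheck_alt (m : Int) (n : Int) : Option Int :=
  if min m n ≤ 0 then none
  else some (min m n - euclidB m n + 2)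

-- ===== PRECONDITION & SPEC =====
def Spec_intcheck (m : Int) (n : Int) (out : Option Int) : Prop := out = intcheck_alt m n
instance (m : Int) (n : Int) (out : Option Int) : Decidable (Spec_intcheck m n out) := by unfold Spec_intcheck; infer_instance

-- ===== CLAIM (what is proved, stated in full; the proofs are below) =====
def Claim_equal_intcheck : Prop := ∀ (m : Int) (n : Int), Dom_intcheck m n → Spec_intcheck m n (intcheck m n)

-- ===== LEMMAS AND PROOFS =====

-- B's Euclid loop computes the (nonnegative) gcd of its nonnegative arguments
theorem euclidB_eq_gcd (b a : Int) (ha : 0 ≤ a) (hb : 0 ≤ b) :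
    euclidB a b = Int.gcd a b := by
  by_cases h : b = 0
  · subst h
    rw [euclidB]
    simp [Int.gcd, Int.natAbs_of_nonneg ha]
  · have hbpos : 0 < b := lt_of_le_of_ne hb (Ne.symm h)
    rw [euclidB]
    simp only [h, ne_eq, not_false_iff, dif_pos]
    rw [PySem.Int.mod_eq_emod_of_pos hbpos]
    have hr1 : 0 ≤ a % b := Int.emod_nonneg a h
    have hr2 : a % b < b := Int.emod_lt_of_pos a hbpos
    have ih := euclidB_eq_gcd (a % b) b hb hr1
    rw [ih]
    have hdef : a % b = a - b * (a / b) := by rw [Int.emod_def]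
    rw [hdef, Int.gcd_sub_mul_left_right b a (a / b), Int.gcd_comm]
termination_by b.natAbs
decreasing_by
  have := Int.emod_lt_of_pos a (by omega : (0:Int) < b)
  have := Int.emod_nonneg a h
  omega

-- A's scan from t down to the first common divisor adds one per failing t, two at the end
theorem intcheckLoop_eq (m n : Int) (hm : 0 < m) (hn : 0 < n) :
    ∀ (t k : Int), (Int.gcd m n : Int) ≤ t →
      intcheckLoop m n t k = some (k + (t - Int.gcd m n) + 2) := by
  intro t k hgt
  have hg : (0:Int) < Int.gcd m n := by
    have : Int.gcd m n ≠ 0 := by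
      simp [Int.gcd_eq_zero_iff]
      omega
    exact_mod_cast Nat.pos_of_ne_zero this
  have ht : 0 < t := lt_of_lt_of_le hg hgt
  by_cases heq : (t ∣ m ∧ t ∣ n)
  · -- t is a common divisor ≤ search start: it must be the gcd, branch returns
    have htg : t ≤ (Int.gcd m n : Int) := by
      have : t ∣ (Int.gcd m n : Int) := Int.dvd_coe_gcd heq.1 heq.2
      exact Int.le_of_dvd hg this
    have : t = (Int.gcd m n : Int) := le_antisymm htg hgt
    rw [intcheckLoop]
    simp only [ht, dif_pos]
    simp only [ne_eq, PySem.Int.mod_eq_zero_iff_dvd]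
    simp [heq.1, heq.2]
    omega
  · -- t is not a common divisor: exactly one of the two counting branches fires
    have htg : (Int.gcd m n : Int) < t := by
      rcases lt_or_eq_of_le hgt with h | h
      · exact h
      · exfalso
        apply heq
        rw [← h]
        exact ⟨Int.gcd_dvd_left m n, Int.gcd_dvd_right m n⟩
    rw [intcheckLoop]
    simp only [ht, dif_pos]
    simp only [ne_eq, PySem.Int.mod_eq_zero_iff_dvd]
    have ih := intcheckLoop_eq m n hm hn (t - 1) (k + 1) (by omega)
    by_cases hdm : t ∣ m
    · have hdn : ¬ t ∣ n := fun hdn => heq ⟨hdm, hdn⟩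
      simp only [hdm, hdn, and_false, and_true, not_true_eq_false, not_false_eq_true, if_true, if_false]
      rw [ih]
      simp only [Option.some.injEq]
      omega
    · simp only [hdm, false_and, not_false_eq_true, if_true, if_false]
      rw [ih]
      simp only [Option.some.injEq]
      omega
termination_by t _ => t.toNat
decreasing_by omega

-- ===== VERDICT (by name: the statement is the Claim_ definition above) =====
theorem intcheck_spec : Claim_equal_intcheck := by
  intro m n _
  unfold Spec_intcheck intcheck intcheck_alt
  by_cases h : min m n ≤ 0
  · rw [intcheckLoop]
    simp [h]
    omega
  · have hm : 0 < m := by omega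
    have hn : 0 < n := by omega
    have hg1 : (Int.gcd m n : Int) ∣ m := Int.gcd_dvd_left m n
    have hg2 : (Int.gcd m n : Int) ∣ n := Int.gcd_dvd_right m n
    have hle : (Int.gcd m n : Int) ≤ min m n := by
      have h1 := Int.le_of_dvd hm hg1
      have h2 := Int.le_of_dvd hn hg2
      omega
    rw [intcheckLoop_eq m n hm hn (min m n) 0 hle]
    rw [euclidB_eq_gcd n m (by omega) (by omega)]
    simp [h]
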